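-- pv_equiv track=rewrite | github.com/Vinita-More/apple_live_update | try9.py | normalize_image_url
-- ===== SOURCE A (Python) =====
-- from typing import List, Dict, Any, Optional, Tuple
--
-- def normalize_image_url(url: Optional[str]) -> Optional[str]:
--     if not url:
--         return None
--
--     url = url.split('?', 1)[0]
--     lower = url.lower()
--
--     jpg_pos = lower.find(".jpg")
--     png_pos = lower.find(".png")
--
--     positions = [pos for pos in [jpg_pos, png_pos] if pos != -1]
--
--     if not positions:
--         return url
--
--     end_pos = min(positions) + 4
--
--     return url[:end_pos]
-- ===== SOURCE B (Python) =====
-- def normalize_image_url(url):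
--     if not url:
--         return None
--     url = url.split('?', 1)[0]
--     low = url.lower()
--     for i in range(len(low) - 3):
--         if low[i:i + 4] in (".jpg", ".png"):
--             return url[:i + 4]
--     return url
-- ===== Notes on version B (the rewrite author's own statement) =====
-- stated objective: alternative
-- what changed: Replaces the two whole-string find() calls plus the positions-list/min selection with a single left-to-right scan that stops at the first position whose 4-character window equals either image extension.
import Mathlib
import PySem

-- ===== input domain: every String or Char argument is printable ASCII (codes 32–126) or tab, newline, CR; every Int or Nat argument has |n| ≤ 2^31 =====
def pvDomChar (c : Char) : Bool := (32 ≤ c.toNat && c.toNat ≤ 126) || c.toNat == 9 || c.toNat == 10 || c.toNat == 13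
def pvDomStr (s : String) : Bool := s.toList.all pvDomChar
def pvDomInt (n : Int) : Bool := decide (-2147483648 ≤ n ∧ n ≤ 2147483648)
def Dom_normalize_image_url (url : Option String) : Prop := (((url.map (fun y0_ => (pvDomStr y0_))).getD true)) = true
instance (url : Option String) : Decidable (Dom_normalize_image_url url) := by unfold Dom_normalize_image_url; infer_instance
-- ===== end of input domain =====

-- B replaces A's two whole-string find() calls + min with one left-to-right first-match scan (same cost, no speed claim).

-- shared preamble line of both sources: url = url.split('?', 1)[0]
-- (split with a non-empty separator always returns some nonempty list; the other arms are unreachable)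
def splitHead (u : String) : String :=
  match PySem.Str.splitMax? u "?" 1 with | some (p :: _) => p | _ => u

-- ===== PORT A =====
def normalize_image_url (url : Option String) : Option String :=
  match url with
  | none => none
  | some u =>
    if u = "" then none                         -- 'if not url: return None'
    else
      let url1 := splitHead u
      let lower := PySem.Str.lower url1
      let jpg_pos := PySem.Str.find lower ".jpg"
      let png_pos := PySem.Str.find lower ".png"
      let positions := [jpg_pos, png_pos].filter (fun pos => pos != -1)
      -- 'if not positions: return url' then 'min(positions)': min? is none exactly on the empty list
      match PySem.List.min? positions (fun x => x) with
      | none => some url1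
      | some m => some (PySem.Str.slice url1 none (some (m + 4)))

-- ===== PORT B =====
-- the scan 'for i in range(len(low)-3): if low[i:i+4] in (".jpg",".png"): return url[:i+4]'
-- (a 4-char window past len-4 is shorter than 4 chars and can never equal either extension,
--  so recursing to the very end is the same loop)
def scanExt : List Char → Option Nat
  | [] => none
  | c :: rest =>
    if (c :: rest).take 4 = ".jpg".toList ∨ (c :: rest).take 4 = ".png".toList then some 0
    else (scanExt rest).map (· + 1)

def normalize_image_url_alt (url : Option String) : Option String :=
  match url with
  | none => none
  | some u =>
    if u = "" then none
    else
      let url1 := splitHead u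
      match scanExt (PySem.Chars.lower url1.toList) with
      | none => some url1
      | some i => some (String.ofList (url1.toList.take (i + 4)))

-- ===== PRECONDITION & SPEC =====
def Spec_normalize_image_url (url : Option String) (out : Option String) : Prop := out = normalize_image_url_alt url
instance (url : Option String) (out : Option String) : Decidable (Spec_normalize_image_url url out) := by unfold Spec_normalize_image_url; infer_instance

-- ===== CLAIM (what is proved, stated in full; the proofs are below) =====
def Claim_equal_normalize_image_url : Prop := ∀ (url : Option String), Dom_normalize_image_url url → Spec_normalize_image_url url (normalize_image_url url)

-- ===== LEMMAS AND PROOFS =====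

-- a match of either extension at position i of l
def MatchAt (l : List Char) (i : Nat) : Prop :=
  ".jpg".toList <+: l.drop i ∨ ".png".toList <+: l.drop i

lemma prefix4_iff (pat x : List Char) (h : pat.length = 4) : pat <+: x ↔ x.take 4 = pat := by
  rw [List.prefix_iff_eq_take, h, eq_comm]

lemma matchAt_zero_iff (c : Char) (rest : List Char) :
    MatchAt (c :: rest) 0 ↔
      ((c :: rest).take 4 = ".jpg".toList ∨ (c :: rest).take 4 = ".png".toList) := by
  rw [MatchAt, List.drop_zero, prefix4_iff ".jpg".toList _ (by decide),
    prefix4_iff ".png".toList _ (by decide)]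

lemma scanExt_eq_none (l : List Char) (h : ∀ i, ¬ MatchAt l i) : scanExt l = none := by
  induction l with
  | nil => rfl
  | cons c rest ih =>
    rw [scanExt, if_neg, ih, Option.map_none]
    · intro i hi
      exact h (i + 1) (by simpa [MatchAt] using hi)
    · exact fun hc => h 0 ((matchAt_zero_iff c rest).2 hc)

lemma scanExt_eq_some (l : List Char) (m : Nat)
    (h1 : MatchAt l m) (h2 : ∀ k < m, ¬ MatchAt l k) : scanExt l = some m := by
  induction l generalizing m with
  | nil =>
    exfalso
    rcases h1 with h | h <;> rw [List.drop_nil] at h <;>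
      exact absurd (List.prefix_nil.mp h) (by decide)
  | cons c rest ih =>
    cases m with
    | zero => rw [scanExt, if_pos ((matchAt_zero_iff c rest).1 h1)]
    | succ m =>
      rw [scanExt, if_neg (fun hc => h2 0 (Nat.succ_pos m) ((matchAt_zero_iff c rest).2 hc))]
      rw [ih m (by simpa [MatchAt] using h1)
        (fun k hk => by
          have := h2 (k + 1) (by omega)
          simpa [MatchAt] using this)]
      rfl

lemma no_prefix_of_find_neg (l sub : List Char) (h : PySem.Chars.find l sub = -1) :
    ∀ i, ¬ sub <+: l.drop i := by
  intro i hi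
  have : PySem.Chars.isIn sub l = true :=
    (PySem.Chars.exists_prefix_drop_iff_isIn sub l).1 ⟨i, hi⟩
  have : sub <:+: l := (PySem.Chars.isIn_iff_infix sub l).1 this
  exact absurd h ((PySem.Chars.find_ne_neg_one_iff l sub).2 this)

lemma slice_eq_ofList_take (s : String) (m : Int) (hm : 0 ≤ m) :
    PySem.Str.slice s none (some (m + 4)) = String.ofList (s.toList.take (m.toNat + 4)) := by
  apply String.toList_injective
  rw [PySem.Str.toList_slice, PySem.Chars.slice_eq_listSlice,
    PySem.List.slice_to s.toList (by omega : (0:Int) ≤ m + 4)]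
  have : (m + 4).toNat = m.toNat + 4 := by omega
  simp [this]

-- the core: on the stripped, already-split string the two tails agree
lemma core_eq (url1 : String) :
    (match PySem.List.min?
        ([PySem.Str.find (PySem.Str.lower url1) ".jpg",
          PySem.Str.find (PySem.Str.lower url1) ".png"].filter (fun pos => pos != -1))
        (fun x => x) with
      | none => some url1
      | some m => some (PySem.Str.slice url1 none (some (m + 4)))) =
    (match scanExt (PySem.Chars.lower url1.toList) with
      | none => some url1
      | some i => some (String.ofList (url1.toList.take (i + 4)))) := by
  set L := PySem.Chars.lower url1.toList with hL
  have hfj : PySem.Str.find (PySem.Str.lower url1) ".jpg" = PySem.Chars.find L ".jpg".toList := by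
    simp [PySem.Str.find_eq, PySem.Str.toList_lower, hL]
  have hfp : PySem.Str.find (PySem.Str.lower url1) ".png" = PySem.Chars.find L ".png".toList := by
    simp [PySem.Str.find_eq, PySem.Str.toList_lower, hL]
  rw [hfj, hfp]
  set fj := PySem.Chars.find L ".jpg".toList with hfjdef
  set fp := PySem.Chars.find L ".png".toList with hfpdef
  by_cases hj : fj = -1 <;> by_cases hp : fp = -1
  · -- neither extension occurs
    rw [scanExt_eq_none L (fun i => by
      rintro (h | h)
      · exact no_prefix_of_find_neg L _ hj i h
      · exact no_prefix_of_find_neg L _ hp i h)]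
    simp [hj, hp, PySem.List.min?]
  · -- only .png occurs
    have hp0 : 0 ≤ fp := by have := PySem.Chars.neg_one_le_find (s := L) (sub := ".png".toList); omega
    obtain ⟨hpre, hmin⟩ := PySem.Chars.find_spec (s := L) (sub := ".png".toList) (by rw [← hfpdef]; exact hp0)
    rw [scanExt_eq_some L fp.toNat (Or.inr hpre)
      (fun k hk => by
        rintro (h | h)
        · exact no_prefix_of_find_neg L _ hj k h
        · exact hmin k hk h)]
    rw [show ([fj, fp].filter (fun pos => pos != -1)) = [fp] by simp [hj, hp]]
    rw [PySem.List.min?_id_cons]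
    simp [slice_eq_ofList_take url1 fp hp0]
  · -- only .jpg occurs
    have hj0 : 0 ≤ fj := by have := PySem.Chars.neg_one_le_find (s := L) (sub := ".jpg".toList); omega
    obtain ⟨hpre, hmin⟩ := PySem.Chars.find_spec (s := L) (sub := ".jpg".toList) (by rw [← hfjdef]; exact hj0)
    rw [scanExt_eq_some L fj.toNat (Or.inl hpre)
      (fun k hk => by
        rintro (h | h)
        · exact hmin k hk h
        · exact no_prefix_of_find_neg L _ hp k h)]
    rw [show ([fj, fp].filter (fun pos => pos != -1)) = [fj] by simp [hj, hp]]
    rw [PySem.List.min?_id_cons]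
    simp [slice_eq_ofList_take url1 fj hj0]
  · -- both occur: the scan stops at the smaller position
    have hj0 : 0 ≤ fj := by have := PySem.Chars.neg_one_le_find (s := L) (sub := ".jpg".toList); omega
    have hp0 : 0 ≤ fp := by have := PySem.Chars.neg_one_le_find (s := L) (sub := ".png".toList); omega
    obtain ⟨hjpre, hjmin⟩ := PySem.Chars.find_spec (s := L) (sub := ".jpg".toList) (by rw [← hfjdef]; exact hj0)
    obtain ⟨hppre, hpmin⟩ := PySem.Chars.find_spec (s := L) (sub := ".png".toList) (by rw [← hfpdef]; exact hp0)
    have hm0 : 0 ≤ min fj fp := le_min hj0 hp0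
    have hmt : (min fj fp).toNat = min fj.toNat fp.toNat := by omega
    rw [scanExt_eq_some L (min fj fp).toNat
      (by
        rcases le_total fj fp with h | h
        · exact Or.inl (by rw [show (min fj fp).toNat = fj.toNat from by omega]; exact hjpre)
        · exact Or.inr (by rw [show (min fj fp).toNat = fp.toNat from by omega]; exact hppre))
      (fun k hk => by
        rintro (h | h)
        · exact hjmin k (by omega) h
        · exact hpmin k (by omega) h)]
    rw [show ([fj, fp].filter (fun pos => pos != -1)) = [fj, fp] by simp [hj, hp]]
    rw [PySem.List.min?_id_cons]
    simp [slice_eq_ofList_take url1 (min fj fp) hm0, List.foldl]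

-- ===== VERDICT (by name: the statement is the Claim_ definition above) =====
theorem normalize_image_url_spec : Claim_equal_normalize_image_url := by
  intro url _
  unfold Spec_normalize_image_url
  cases url with
  | none => rfl
  | some u =>
    by_cases hu : u = ""
    · simp only [normalize_image_url, normalize_image_url_alt, if_pos hu]
    · simp only [normalize_image_url, normalize_image_url_alt, if_neg hu]
      exact core_eq (splitHead u)
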